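-- pv_equiv track=rewrite | github.com/herzenuni/sem6-finaltask-230618-margaritaknsv | task.py | LenOfWord
-- ===== SOURCE A (Python) =====
-- def LenOfWord(string):
--     words = string.strip().split(' ')
--     index = -1
--     while True:
--         index += 1
--         if (index == len(words)):
--             break
--         if (words[index] == ' '):
--             continue
--         yield len(words[index])
-- ===== SOURCE B (Python) =====
-- def LenOfWord(string):
--     count = 0
--     for ch in string.strip():
--         if ch == ' ':
--             yield count
--             count = 0
--         else:
--             count += 1
--     yield count
-- ===== Notes on version B (the rewrite author's own statement) =====
-- stated objective: simpler
-- what changed: Replaces strip-then-split-on-single-space plus an index-driven while loop over the token list by a single character scan over the stripped string that yields a running counter at each space (and once at the end), never materialising the token list.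
import Mathlib
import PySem

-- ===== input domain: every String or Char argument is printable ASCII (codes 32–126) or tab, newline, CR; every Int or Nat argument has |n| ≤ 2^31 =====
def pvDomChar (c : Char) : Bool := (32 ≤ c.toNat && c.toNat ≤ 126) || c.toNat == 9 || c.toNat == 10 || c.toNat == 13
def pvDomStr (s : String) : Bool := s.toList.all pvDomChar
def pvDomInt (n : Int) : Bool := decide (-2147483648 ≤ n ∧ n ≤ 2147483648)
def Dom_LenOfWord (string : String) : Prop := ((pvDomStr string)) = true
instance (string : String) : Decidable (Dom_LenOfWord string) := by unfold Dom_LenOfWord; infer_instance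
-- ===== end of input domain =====

-- B replaces strip().split(' ') + an index-driven while loop by one character scan with a counter; objective: simpler, same cost.

-- ===== PORT A =====
-- the while loop of A: walk the token list in order; skip a token equal to " ", otherwise yield its length
def LenOfWordA_go : List String → List Int
  | [] => []
  | w :: ws => if w == " " then LenOfWordA_go ws else (PySem.Str.len w : Int) :: LenOfWordA_go ws

def LenOfWord (string : String) : List Int :=
  let words := (PySem.Str.split? (PySem.Str.strip string) " ").getD []  -- sep ≠ "", so split? is `some`
  LenOfWordA_go words

-- ===== PORT B =====
-- Source B's for-loop over the stripped string's characters, carrying the running counter; the final yield is the base case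
def LenOfWordB_go : List Char → Int → List Int
  | [], count => [count]
  | ch :: rest, count =>
      if ch == ' ' then count :: LenOfWordB_go rest 0
      else LenOfWordB_go rest (count + 1)

def LenOfWord_alt (string : String) : List Int :=
  LenOfWordB_go (PySem.Str.strip string).toList 0

-- ===== PRECONDITION & SPEC =====
def Spec_LenOfWord (string : String) (out : List Int) : Prop := out = LenOfWord_alt string
instance (string : String) (out : List Int) : Decidable (Spec_LenOfWord string out) := by unfold Spec_LenOfWord; infer_instance

-- ===== CLAIM (what is proved, stated in full; the proofs are below) =====
def Claim_equal_LenOfWord : Prop := ∀ (string : String), Dom_LenOfWord string → Spec_LenOfWord string (LenOfWord string)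

-- ===== LEMMAS AND PROOFS =====

-- a simple accumulator form of splitting on a single space
def split1 : List Char → List Char → List (List Char)
  | [], cur => [cur.reverse]
  | c :: t, cur => if c = ' ' then cur.reverse :: split1 t [] else split1 t (c :: cur)

lemma splitOn_go_space (fuel : Nat) :
    ∀ (l cur : List Char) (acc : List (List Char)), l.length < fuel →
      PySem.Chars.splitOn.go [' '] fuel l cur acc = acc.reverse ++ split1 l cur := by
  induction fuel with
  | zero => intro l cur acc h; omega
  | succ n ih =>
    intro l cur acc h
    cases l with
    | nil => simp [PySem.Chars.splitOn.go, split1]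
    | cons c rest =>
      by_cases hc : c = ' '
      · subst hc
        simp only [PySem.Chars.splitOn.go]
        rw [if_pos (by simp [List.isPrefixOf])]
        simp only [List.length_cons, List.length_nil, List.drop_succ_cons, List.drop_zero]
        rw [ih rest [] (cur.reverse :: acc) (by simp at h; omega)]
        simp [split1]
      · simp only [PySem.Chars.splitOn.go]
        rw [if_neg (by simp [List.isPrefixOf]; intro h'; exact hc h'.symm),
            ih rest (c :: cur) acc (by simp at h; omega)]
        simp [split1, hc]

lemma splitOn_space (cs : List Char) :
    PySem.Chars.splitOn cs [' '] = split1 cs [] := by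
  simpa using splitOn_go_space (cs.length + 1) cs [] [] (by omega)

-- tokens produced by split1 contain no space (so A's `== " "` branch never fires)
lemma split1_no_space (cs : List Char) :
    ∀ (cur : List Char), (∀ c ∈ cur, c ≠ ' ') →
      ∀ w ∈ split1 cs cur, ' ' ∉ w := by
  induction cs with
  | nil =>
    intro cur hcur w hw
    simp [split1] at hw; subst hw
    simp only [List.mem_reverse]; intro hm; exact hcur ' ' hm rfl
  | cons c t ih =>
    intro cur hcur w hw
    by_cases hc : c = ' '
    · subst hc; simp [split1] at hw
      rcases hw with hw | hw
      · subst hw; simp only [List.mem_reverse]; intro hm; exact hcur ' ' hm rfl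
      · exact ih [] (by simp) w hw
    · simp [split1, hc] at hw
      refine ih (c :: cur) ?_ w hw
      intro c' hmem
      rcases List.mem_cons.mp hmem with rfl | hmem'
      · exact hc
      · exact hcur c' hmem'

-- on a token list with no " " token, A's loop maps len
lemma goA_eq_map (ws : List String) (h : ∀ w ∈ ws, w ≠ " ") :
    LenOfWordA_go ws = ws.map (fun w => (PySem.Str.len w : Int)) := by
  induction ws with
  | nil => rfl
  | cons w ws ih =>
    have hw : (w == " ") = false := by
      simpa using h w (by simp)
    simp [LenOfWordA_go, hw, ih (fun w' hw' => h w' (by simp [hw']))]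

-- B's scan computes the token lengths of split1
lemma goB_eq (cs : List Char) :
    ∀ (cur : List Char),
      LenOfWordB_go cs (cur.length : Int) = (split1 cs cur).map (fun w => (w.length : Int)) := by
  induction cs with
  | nil => intro cur; simp [LenOfWordB_go, split1]
  | cons c t ih =>
    intro cur
    by_cases hc : c = ' '
    · subst hc
      simpa [LenOfWordB_go, split1] using ih []
    · have : ((cur.length : Int) + 1) = (((c :: cur).length : Nat) : Int) := by
        push_cast [List.length_cons]; ring
      simp only [LenOfWordB_go, split1, if_neg hc]
      rw [if_neg (by simpa using hc), this, ih (c :: cur)]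

-- ===== VERDICT (by name: the statement is the Claim_ definition above) =====
theorem LenOfWord_spec : Claim_equal_LenOfWord := by
  intro string _
  unfold Spec_LenOfWord LenOfWord LenOfWord_alt
  set cs := (PySem.Str.strip string).toList with hcs
  have hsplit : PySem.Str.split? (PySem.Str.strip string) " " =
      some ((split1 cs []).map String.ofList) := by
    simp [PySem.Str.split?, PySem.Chars.split?, splitOn_space, hcs]
  rw [hsplit]
  simp only [Option.getD_some]
  rw [goA_eq_map]
  · rw [List.map_map]
    have h0 := goB_eq cs ([] : List Char)
    simp only [List.length_nil, Nat.cast_zero] at h0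
    rw [h0]
    simp [PySem.Str.len, Function.comp]
  · intro w hw heq
    simp only [List.mem_map] at hw
    rcases hw with ⟨t, ht, rfl⟩
    have hns := split1_no_space cs [] (by simp) t ht
    have : t = [' '] := by
      have := congrArg String.toList heq
      simpa using this
    exact hns (this ▸ by simp)
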